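-- pv_equiv track=rewrite | github.com/suxinhang/SpeechJudge | infer/rank_jobs_app/core/ranking.py | collapse_pairwise_votes
-- ===== SOURCE A (Python) =====
-- def majority_vote(votes: list[int]) -> int:
--     positive = sum(1 for vote in votes if vote > 0)
--     negative = sum(1 for vote in votes if vote < 0)
--     if positive > negative:
--         return 1
--     if negative > positive:
--         return -1
--     return 0
--
-- def collapse_pairwise_votes(votes: list[int], votes_per_pair: int) -> list[int]:
--     if votes_per_pair <= 1:
--         return list(votes)
--     if len(votes) % votes_per_pair != 0:
--         raise ValueError("votes length must be divisible by votes_per_pair")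
--     collapsed: list[int] = []
--     for idx in range(0, len(votes), votes_per_pair):
--         collapsed.append(majority_vote(votes[idx : idx + votes_per_pair]))
--     return collapsed
-- ===== SOURCE B (Python) =====
-- def collapse_pairwise_votes(votes: list[int], votes_per_pair: int) -> list[int]:
--     if votes_per_pair <= 1:
--         return list(votes)
--     if len(votes) % votes_per_pair != 0:
--         raise ValueError("votes length must be divisible by votes_per_pair")
--     collapsed: list[int] = []
--     pos = neg = 0
--     for i, v in enumerate(votes):
--         if v > 0:
--             pos += 1
--         elif v < 0:
--             neg += 1
--         if (i + 1) % votes_per_pair == 0: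
--             collapsed.append(1 if pos > neg else (-1 if neg > pos else 0))
--             pos = neg = 0
--     return collapsed
-- ===== Notes on version B (the rewrite author's own statement) =====
-- stated objective: simpler
-- what changed: Replaced the per-chunk slicing and the two-pass majority_vote helper by a single streaming pass over the votes with running positive/negative counters that are flushed into the result at each chunk boundary.
import Mathlib
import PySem

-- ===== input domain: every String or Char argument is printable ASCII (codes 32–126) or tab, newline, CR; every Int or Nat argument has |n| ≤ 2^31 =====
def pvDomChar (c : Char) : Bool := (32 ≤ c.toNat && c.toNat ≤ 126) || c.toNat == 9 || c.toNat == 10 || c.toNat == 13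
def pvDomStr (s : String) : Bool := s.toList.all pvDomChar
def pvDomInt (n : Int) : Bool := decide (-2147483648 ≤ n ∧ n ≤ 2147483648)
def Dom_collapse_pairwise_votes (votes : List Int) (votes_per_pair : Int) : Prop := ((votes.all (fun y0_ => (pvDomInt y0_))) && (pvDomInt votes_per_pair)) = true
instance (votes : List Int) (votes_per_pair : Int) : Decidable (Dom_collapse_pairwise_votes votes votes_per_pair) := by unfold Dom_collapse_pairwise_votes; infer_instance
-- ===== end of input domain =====

-- B replaces the per-chunk slicing + two-pass majority_vote helper by one streaming pass with
-- running positive/negative counters flushed at each chunk boundary (objective: simpler).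

-- ===== PORT A =====
def majority_vote (votes : List Int) : Int :=
  let positive : Int := (List.map (fun _ => (1 : Int)) (votes.filter (fun v => decide (0 < v)))).sum
  let negative : Int := (List.map (fun _ => (1 : Int)) (votes.filter (fun v => decide (v < 0)))).sum
  if positive > negative then 1
  else if negative > positive then -1
  else 0

def collapse_pairwise_votes (votes : List Int) (votes_per_pair : Int) : List Int :=
  if votes_per_pair ≤ 1 then votes
  else
    -- Python raises ValueError when len(votes) % votes_per_pair ≠ 0; Pre_ excludes those inputs.
    (PySem.List.pyRange 0 (votes.length : Int) votes_per_pair).foldl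
      (fun collapsed idx =>
        collapsed ++ [majority_vote (PySem.List.slice votes (some idx) (some (idx + votes_per_pair)))])
      []

-- ===== PORT B =====
def pvAltGo (votes_per_pair : Int) : List Int → Int → Int → Int → List Int → List Int
  | [], _, _, _, acc => acc
  | v :: rest, i, pos, neg, acc =>
    let pn := if 0 < v then (pos + 1, neg) else if v < 0 then (pos, neg + 1) else (pos, neg)
    if PySem.Int.mod (i + 1) votes_per_pair = 0 then
      pvAltGo votes_per_pair rest (i + 1) 0 0
        (acc ++ [if pn.1 > pn.2 then 1 else if pn.2 > pn.1 then -1 else 0])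
    else
      pvAltGo votes_per_pair rest (i + 1) pn.1 pn.2 acc

def collapse_pairwise_votes_alt (votes : List Int) (votes_per_pair : Int) : List Int :=
  if votes_per_pair ≤ 1 then votes
  else pvAltGo votes_per_pair votes 0 0 0 []

-- ===== PRECONDITION & SPEC =====
-- Pre_ excludes exactly the inputs on which A raises ValueError (length not divisible by votes_per_pair).
def Pre_collapse_pairwise_votes (votes : List Int) (votes_per_pair : Int) : Prop :=
  votes_per_pair ≤ 1 ∨ PySem.Int.mod (votes.length : Int) votes_per_pair = 0

instance (votes : List Int) (votes_per_pair : Int) : Decidable (Pre_collapse_pairwise_votes votes votes_per_pair) := by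
  unfold Pre_collapse_pairwise_votes; infer_instance

def pvWitness_collapse_pairwise_votes : List Int × Int := ([1, -1, 1, 1], 2)

def Spec_collapse_pairwise_votes (votes : List Int) (votes_per_pair : Int) (out : List Int) : Prop := out = collapse_pairwise_votes_alt votes votes_per_pair
instance (votes : List Int) (votes_per_pair : Int) (out : List Int) : Decidable (Spec_collapse_pairwise_votes votes votes_per_pair out) := by unfold Spec_collapse_pairwise_votes; infer_instance

-- ===== CLAIM (what is proved, stated in full; the proofs are below) =====
def Claim_equal_collapse_pairwise_votes : Prop := ∀ (votes : List Int) (votes_per_pair : Int), Dom_collapse_pairwise_votes votes votes_per_pair → Pre_collapse_pairwise_votes votes votes_per_pair → Spec_collapse_pairwise_votes votes votes_per_pair (collapse_pairwise_votes votes votes_per_pair)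

-- ===== LEMMAS AND PROOFS =====

def pvVerdict (p n : Int) : Int := if p > n then 1 else if n > p then -1 else 0

def pvPos (c : List Int) : Int := ((c.countP fun v => decide (0 < v) : Nat) : Int)
def pvNeg (c : List Int) : Int := ((c.countP fun v => decide (v < 0) : Nat) : Int)

def pvChunks (k : Nat) (votes : List Int) : List Int :=
  if h : votes = [] ∨ k = 0 then []
  else
    pvVerdict (pvPos (votes.take k)) (pvNeg (votes.take k)) :: pvChunks k (votes.drop k)
termination_by votes.length
decreasing_by
  push_neg at h
  have h0 : 0 < votes.length := List.length_pos_iff.mpr h.1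
  simp only [List.length_drop]
  omega

lemma pvChunks_nil (k : Nat) : pvChunks k [] = [] := by
  rw [pvChunks]; simp

lemma pvChunks_cons (k : Nat) (votes : List Int) (hk : k ≠ 0) (hv : votes ≠ []) :
    pvChunks k votes
      = pvVerdict (pvPos (votes.take k)) (pvNeg (votes.take k)) :: pvChunks k (votes.drop k) := by
  rw [pvChunks]; rw [dif_neg (by tauto)]

lemma pvSumOnes (l : List Int) : (List.map (fun _ => (1 : Int)) l).sum = (l.length : Int) := by
  induction l with
  | nil => simp
  | cons a t ih => simp [ih]; omega

lemma pvLenFilter (p : Int → Bool) (l : List Int) : (l.filter p).length = l.countP p := by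
  induction l with
  | nil => simp
  | cons a t ih => by_cases h : p a <;> simp [List.filter_cons, List.countP_cons, h, ih]

lemma pvMajority_eq (c : List Int) : majority_vote c = pvVerdict (pvPos c) (pvNeg c) := by
  unfold majority_vote pvVerdict pvPos pvNeg
  simp only [pvSumOnes, pvLenFilter]

lemma pvRange_cons (a b s : Int) (hs : 0 < s) (hab : a < b) :
    PySem.List.pyRange a b s = a :: PySem.List.pyRange (a + s) b s := by
  rw [PySem.List.pyRange_of_pos _ _ hs, PySem.List.pyRange_of_pos _ _ hs]
  have hq0 : 0 ≤ (b - a - 1) / s := Int.ediv_nonneg (by omega) (by omega)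
  have h1 : (b - a + s - 1) / s = (b - a - 1) / s + 1 := by
    have h : b - a + s - 1 = (b - a - 1) + 1 * s := by ring
    rw [h, Int.add_mul_ediv_right _ _ (by omega : s ≠ 0)]
  have h3 : b - (a + s) + s - 1 = b - a - 1 := by ring
  rw [if_pos hab, h1, h3]
  have h2 : ((b - a - 1) / s + 1).toNat = ((b - a - 1) / s).toNat + 1 := by omega
  rw [h2, List.range_succ_eq_map]
  have hfun : (fun x : Nat => a + s * ((x + 1 : Nat) : Int)) = fun x : Nat => (a + s) + s * (x : Int) := by
    funext x; push_cast; ring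
  by_cases hb : a + s < b
  · rw [if_pos hb]
    simp only [List.map_cons, List.map_map, Nat.cast_zero, mul_zero, add_zero]
    refine congrArg _ ?_
    simp only [Function.comp_def, Nat.succ_eq_add_one]
    rw [hfun]
  · rw [if_neg hb]
    have hz : (b - a - 1) / s = 0 := Int.ediv_eq_zero_of_lt (by omega) (by omega)
    simp [hz]

lemma pvRange_nil (a b s : Int) (hs : 0 < s) (h : b ≤ a) :
    PySem.List.pyRange a b s = [] := by
  rw [PySem.List.pyRange_of_pos _ _ hs, if_neg (by omega)]
  simp

lemma pvA_loop (k : Nat) (hk : 0 < k) :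
    ∀ (n : Nat) (rest pre acc : List Int), rest.length = n → rest.length % k = 0 →
    (PySem.List.pyRange ((pre.length : Int)) ((pre.length : Int) + (rest.length : Int)) (k : Int)).foldl
      (fun c idx =>
        c ++ [majority_vote (PySem.List.slice (pre ++ rest) (some idx) (some (idx + (k : Int))))])
      acc
    = acc ++ pvChunks k rest := by
  intro n
  induction n using Nat.strong_induction_on with
  | _ n ih =>
    intro rest pre acc hn hmod
    rcases rest with _ | ⟨v, rs⟩
    · simp only [List.length_nil, Nat.cast_zero, add_zero]
      rw [pvRange_nil _ _ _ (by exact_mod_cast hk) le_rfl]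
      simp [pvChunks_nil]
    · set rest : List Int := v :: rs with hrest
      have hpos : 0 < rest.length := by simp [hrest]
      have hdvd : k ∣ rest.length := Nat.dvd_of_mod_eq_zero hmod
      have hkle : k ≤ rest.length := Nat.le_of_dvd hpos hdvd
      have hab : ((pre.length : Int)) < (pre.length : Int) + (rest.length : Int) := by omega
      rw [pvRange_cons _ _ _ (by exact_mod_cast hk) hab, List.foldl_cons]
      rw [PySem.List.slice_natCast_add (pre ++ rest) pre.length k, List.drop_left]
      set pre' := pre ++ rest.take k with hpre'def
      set rest' := rest.drop k with hrest'def
      have happ : pre' ++ rest' = pre ++ rest := by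
        rw [hpre'def, hrest'def, List.append_assoc, List.take_append_drop]
      have htk : (rest.take k).length = k := by
        simp [List.length_take, min_eq_left hkle]
      have hpre' : pre'.length = pre.length + k := by
        simp [hpre'def, htk]
      have hlen' : rest'.length = rest.length - k := by
        simp [hrest'def]
      have hmod' : rest'.length % k = 0 := by
        rw [hlen']
        obtain ⟨c, hc⟩ := Nat.dvd_sub hdvd dvd_rfl
        rw [hc]
        exact Nat.mul_mod_right k c
      have hrec := ih (rest.length - k) (by omega) rest' pre'
        (acc ++ [majority_vote (rest.take k)]) (by omega) hmod'
      rw [happ] at hrec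
      have e1 : ((pre'.length : Int)) = (pre.length : Int) + (k : Int) := by
        rw [hpre']; push_cast; ring
      rw [e1] at hrec
      have e2 : ((pre.length : Int) + (k : Int)) + ((rest'.length : Int))
          = (pre.length : Int) + (rest.length : Int) := by
        have := hlen'; omega
      rw [e2] at hrec
      rw [hrec]
      rw [pvChunks_cons k rest (by omega) (by simp [hrest])]
      rw [pvMajority_eq]
      simp [hrest'def]

lemma pvB_chunk (k : Nat) (hk : 0 < k) :
    ∀ (c : List Int), c ≠ [] → c.length ≤ k →
    ∀ (rest : List Int) (i pos neg : Int) (acc : List Int),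
    PySem.Int.mod (i + (c.length : Int)) (k : Int) = 0 →
    pvAltGo (k : Int) (c ++ rest) i pos neg acc
      = pvAltGo (k : Int) rest (i + (c.length : Int)) 0 0
          (acc ++ [pvVerdict (pos + pvPos c) (neg + pvNeg c)]) := by
  intro c
  induction c with
  | nil => intro h; exact absurd rfl h
  | cons v c' ih =>
    intro _ hle rest i pos neg acc hmod
    rcases c' with _ | ⟨w, ws⟩
    · -- single element: boundary fires
      simp only [List.length_cons, List.length_nil, Nat.cast_add, Nat.cast_zero,
        Nat.cast_one, zero_add] at hmod ⊢
      simp only [List.cons_append, List.nil_append, pvAltGo]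
      rw [if_pos hmod]
      have hval : ∀ pn : Int × Int,
          pn = (if 0 < v then (pos + 1, neg) else if v < 0 then (pos, neg + 1) else (pos, neg)) →
          (if pn.1 > pn.2 then (1 : Int) else if pn.2 > pn.1 then -1 else 0)
            = pvVerdict (pos + pvPos [v]) (neg + pvNeg [v]) := by
        intro pn hpn
        simp only [pvVerdict, pvPos, pvNeg, List.countP_cons, List.countP_nil]
        rcases lt_trichotomy 0 v with h | h | h
        · simp [hpn, h, not_lt.mpr (le_of_lt h)]
        · simp [hpn, ← h]
        · simp [hpn, h, not_lt.mpr (le_of_lt h), lt_irrefl]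
      rw [hval _ rfl]
    · -- interior element: boundary cannot fire
      set c' : List Int := w :: ws with hc'
      have hc'pos : 0 < c'.length := by simp [hc']
      have hc'lt : c'.length < k := by
        have := hle; simp only [List.length_cons] at this ⊢; omega
      have hnot : ¬ PySem.Int.mod (i + 1) (k : Int) = 0 := by
        intro hcontr
        rw [PySem.Int.mod_eq_zero_iff_dvd] at hcontr hmod
        have hdvd : (k : Int) ∣ ((c'.length : Int)) := by
          have h1 : (i + (((v :: c').length : Nat) : Int)) - (i + 1) = (c'.length : Int) := by
            simp only [List.length_cons]; push_cast; ring
          calc (k : Int) ∣ (i + (((v :: c').length : Nat) : Int)) - (i + 1) :=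
              dvd_sub hmod hcontr
            _ = (c'.length : Int) := h1
        have : (k : Nat) ∣ c'.length := by exact_mod_cast hdvd
        have := Nat.le_of_dvd hc'pos this
        omega
      simp only [List.cons_append, pvAltGo]
      rw [if_neg hnot]
      have hmod2 : PySem.Int.mod ((i + 1) + (c'.length : Int)) (k : Int) = 0 := by
        have : (i + 1) + (c'.length : Int) = i + (((v :: c').length : Nat) : Int) := by
          simp only [List.length_cons]; push_cast; ring
        rw [this]; exact hmod
      rw [ih (by simp [hc']) (by simp only [List.length_cons] at hle; omega) rest (i + 1) _ _ acc hmod2]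
      have elen : (i + 1) + (c'.length : Int) = i + (((v :: c').length : Nat) : Int) := by
        simp only [List.length_cons]; push_cast; ring
      rw [elen]
      have ecnt :
          (if 0 < v then (pos + 1, neg) else if v < 0 then (pos, neg + 1) else (pos, neg)).1 + pvPos c'
              = pos + pvPos (v :: c')
          ∧ (if 0 < v then (pos + 1, neg) else if v < 0 then (pos, neg + 1) else (pos, neg)).2 + pvNeg c'
              = neg + pvNeg (v :: c') := by
        simp only [pvPos, pvNeg, List.countP_cons]
        rcases lt_trichotomy 0 v with h | h | h
        · simp [h, not_lt.mpr (le_of_lt h)]; push_cast; ring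
        · simp [← h]
        · simp [h, not_lt.mpr (le_of_lt h), lt_irrefl]; push_cast; ring
      rw [ecnt.1, ecnt.2]

lemma pvB_loop (k : Nat) (hk : 0 < k) :
    ∀ (n : Nat) (rest : List Int) (i : Int) (acc : List Int), rest.length = n →
    rest.length % k = 0 → PySem.Int.mod i (k : Int) = 0 →
    pvAltGo (k : Int) rest i 0 0 acc = acc ++ pvChunks k rest := by
  intro n
  induction n using Nat.strong_induction_on with
  | _ n ih =>
    intro rest i acc hn hmod hi
    rcases rest with _ | ⟨v, rs⟩
    · simp [pvAltGo, pvChunks_nil]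
    · set rest : List Int := v :: rs with hrest
      have hpos : 0 < rest.length := by simp [hrest]
      have hdvd : k ∣ rest.length := Nat.dvd_of_mod_eq_zero hmod
      have hkle : k ≤ rest.length := Nat.le_of_dvd hpos hdvd
      have htk : (rest.take k).length = k := by
        simp [List.length_take, min_eq_left hkle]
      have hne : rest.take k ≠ [] := by
        intro h; rw [h] at htk; simp at htk; omega
      have hsplit : rest.take k ++ rest.drop k = rest := List.take_append_drop k rest
      have hmodk : PySem.Int.mod (i + ((rest.take k).length : Int)) (k : Int) = 0 := by
        rw [htk, PySem.Int.mod_eq_zero_iff_dvd]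

        rw [PySem.Int.mod_eq_zero_iff_dvd] at hi
        exact dvd_add hi dvd_rfl
      have hstep := pvB_chunk k hk (rest.take k) hne (by omega) (rest.drop k) i 0 0 acc hmodk
      rw [hsplit] at hstep
      rw [hstep]
      have hmod' : (rest.drop k).length % k = 0 := by
        simp only [List.length_drop]
        obtain ⟨c, hc⟩ := Nat.dvd_sub hdvd dvd_rfl
        rw [hc]
        exact Nat.mul_mod_right k c
      have hi' : PySem.Int.mod (i + ((rest.take k).length : Int)) (k : Int) = 0 := hmodk
      have hrec := ih (rest.length - k) (by omega) (rest.drop k)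
        (i + ((rest.take k).length : Int))
        (acc ++ [pvVerdict (0 + pvPos (rest.take k)) (0 + pvNeg (rest.take k))])
        (by simp) hmod' hi'
      rw [hrec]
      rw [pvChunks_cons k rest (by omega) (by simp [hrest])]
      simp

-- ===== VERDICT (by name: the statement is the Claim_ definition above) =====
theorem collapse_pairwise_votes_spec : Claim_equal_collapse_pairwise_votes := by
  intro votes vpp _ hpre
  unfold Spec_collapse_pairwise_votes collapse_pairwise_votes collapse_pairwise_votes_alt
  by_cases hv : vpp ≤ 1
  · simp [hv]
  · rw [if_neg hv, if_neg hv]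
    have hvpos : 0 < vpp := by omega
    set k := vpp.toNat with hkdef
    have hk : 0 < k := by omega
    have hvk : (k : Int) = vpp := Int.toNat_of_nonneg (by omega)
    have hlen : votes.length % k = 0 := by
      rcases hpre with h | h
      · omega
      · rw [PySem.Int.mod_eq_emod_of_pos hvpos, ← hvk] at h
        exact_mod_cast h
    have hA := pvA_loop k hk votes.length votes [] [] rfl hlen
    simp only [List.length_nil, Nat.cast_zero, zero_add, List.nil_append] at hA
    have hi0 : PySem.Int.mod 0 (k : Int) = 0 :=
      (PySem.Int.mod_eq_zero_iff_dvd 0 (k : Int)).mpr (dvd_zero _)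
    have hB := pvB_loop k hk votes.length votes 0 [] rfl hlen hi0
    simp only [List.nil_append] at hB
    rw [hvk] at hA hB
    rw [hA, hB]
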